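-- pv_equiv track=rewrite | github.com/yyfsunnyboy/Mathproject_tvet_mathB | tests/test_vocational_math_b4_generators_phase4e14a.py | _bruteforce_digit_parity
-- ===== SOURCE A (Python) =====
-- import itertools
--
-- def _bruteforce_digit_parity(digits: list[int], positions: int, variant: str) -> int:
--     count = 0
--     for seq in itertools.permutations(digits, positions):
--         if seq[0] == 0:
--             continue
--         if variant == "odd_number" and seq[-1] % 2 == 0:
--             continue
--         if variant == "even_number" and seq[-1] % 2 != 0:
--             continue
--         count += 1
--     return count
-- ===== SOURCE B (Python) =====
-- def _falling(n: int, k: int) -> int: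
--     r = 1
--     for i in range(k):
--         r *= n - i
--     return r
--
--
-- def _bruteforce_digit_parity(digits: list[int], positions: int, variant: str) -> int:
--     n = len(digits)
--     if positions < 1 or n < positions:
--         return 0
--     nonzero = sum(1 for d in digits if d != 0)
--     if variant == "odd_number":
--         qc = pqc = sum(1 for d in digits if d % 2 != 0)
--     elif variant == "even_number":
--         qc = sum(1 for d in digits if d % 2 == 0)
--         pqc = sum(1 for d in digits if d % 2 == 0 and d != 0)
--     else:
--         qc, pqc = n, nonzero
--     if positions == 1:
--         return pqc
--     return (nonzero * qc - pqc) * _falling(n - 2, positions - 2)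
-- ===== Notes on version B (the rewrite author's own statement) =====
-- stated objective: faster
-- what changed: Replaced the brute-force enumeration of all k-permutations with a closed-form combinatorial count (classify digits, count valid first/last pairs, multiply by a falling factorial for the middle positions); intended as faster: a timing run measured A timing out from n=16 while B returns, and B 2.03x at the largest size both finished (too little total time to confirm the ratio).
import Mathlib
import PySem

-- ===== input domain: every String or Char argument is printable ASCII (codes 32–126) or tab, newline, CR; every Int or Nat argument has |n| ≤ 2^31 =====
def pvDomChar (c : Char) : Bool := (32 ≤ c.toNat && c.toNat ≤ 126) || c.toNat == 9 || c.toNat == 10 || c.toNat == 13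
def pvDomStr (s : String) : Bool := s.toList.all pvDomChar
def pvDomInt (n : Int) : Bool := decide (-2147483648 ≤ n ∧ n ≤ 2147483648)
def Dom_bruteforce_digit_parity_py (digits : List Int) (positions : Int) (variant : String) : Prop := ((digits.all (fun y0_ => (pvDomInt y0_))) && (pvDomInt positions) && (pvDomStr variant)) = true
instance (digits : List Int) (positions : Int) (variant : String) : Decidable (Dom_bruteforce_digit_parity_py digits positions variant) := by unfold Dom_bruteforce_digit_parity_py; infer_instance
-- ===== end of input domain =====

-- B replaces A's brute-force enumeration of all k-permutations by a closed-form combinatorial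
-- count (valid first/last digit pairs times a falling factorial for the middle positions);
-- intended as faster (a timing run saw A time out from n=16 while B returned, and B 2.03x
-- at the largest size both finished, which was too quick to confirm a ratio).

-- ===== PORT A =====
-- literal transliteration of A: enumerate itertools.permutations(digits, positions)
-- (= PySem.List.permutations), skip by the three 'continue' conditions, count the rest.
-- The '.getD 0' on the two element accesses only makes the access total; under
-- Pre_ (positions ≥ 1) every seq is nonempty, so the access never yields none there.
def bruteforce_digit_parity_py (digits : List Int) (positions : Int) (variant : String) : Int :=
  (PySem.List.permutations digits positions.toNat).foldl
    (fun count seq =>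
      if ((PySem.List.pyGet? seq 0).getD 0) == 0 then count
      else if variant == "odd_number" && (PySem.Int.mod ((PySem.List.pyGet? seq (-1)).getD 0) 2 == 0) then count
      else if variant == "even_number" && !(PySem.Int.mod ((PySem.List.pyGet? seq (-1)).getD 0) 2 == 0) then count
      else count + 1) 0

-- ===== PORT B =====
-- _falling(n, k): r = 1; for i in range(k): r *= n - i; return r
def fallI (a : Int) (k : Nat) : Int :=
  (List.range k).foldl (fun (r : Int) (i : Nat) => r * (a - (i : Int))) 1

-- literal transliteration of Source B's closed-form count
def bruteforce_digit_parity_py_alt (digits : List Int) (positions : Int) (variant : String) : Int :=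
  let n : Int := digits.length
  if positions < 1 || n < positions then 0
  else
    let nonzero : Int := (digits.countP (fun d => !(d == 0)) : Nat)
    let qpq : Int × Int :=
      if variant == "odd_number" then
        let o : Int := (digits.countP (fun d => !(PySem.Int.mod d 2 == 0)) : Nat)
        (o, o)
      else if variant == "even_number" then
        (((digits.countP (fun d => PySem.Int.mod d 2 == 0) : Nat) : Int),
         ((digits.countP (fun d => PySem.Int.mod d 2 == 0 && !(d == 0)) : Nat) : Int))
      else (n, nonzero)
    if positions == 1 then qpq.2
    else (nonzero * qpq.1 - qpq.2) * fallI (n - 2) (positions - 2).toNat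

-- ===== PRECONDITION & SPEC =====
-- Pre_ excludes exactly positions < 1: there Python A raises (ValueError from
-- itertools.permutations for negative positions, IndexError from seq[0] for positions == 0).
def Pre_bruteforce_digit_parity_py (digits : List Int) (positions : Int) (variant : String) : Prop :=
  1 ≤ positions
instance (digits : List Int) (positions : Int) (variant : String) : Decidable (Pre_bruteforce_digit_parity_py digits positions variant) := by unfold Pre_bruteforce_digit_parity_py; infer_instance

def pvWitness_bruteforce_digit_parity_py : List Int × Int × String := ([1, 2, 3, 0], 2, "odd_number")

def Spec_bruteforce_digit_parity_py (digits : List Int) (positions : Int) (variant : String) (out : Int) : Prop := out = bruteforce_digit_parity_py_alt digits positions variant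
instance (digits : List Int) (positions : Int) (variant : String) (out : Int) : Decidable (Spec_bruteforce_digit_parity_py digits positions variant out) := by unfold Spec_bruteforce_digit_parity_py; infer_instance

-- ===== CLAIM (what is proved, stated in full; the proofs are below) =====
def Claim_equal_bruteforce_digit_parity_py : Prop := ∀ (digits : List Int) (positions : Int) (variant : String), Dom_bruteforce_digit_parity_py digits positions variant → Pre_bruteforce_digit_parity_py digits positions variant → Spec_bruteforce_digit_parity_py digits positions variant (bruteforce_digit_parity_py digits positions variant)

-- ===== LEMMAS AND PROOFS =====

def picks : List Int → List (Int × List Int)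
  | [] => []
  | x :: xs => (x, xs) :: (picks xs).map (fun p => (p.1, x :: p.2))
def ffNat (a k : Nat) : Nat := ∏ i ∈ Finset.range k, (a - i)

theorem ffNat_succ_front (a k : Nat) : ffNat a (k + 1) = a * ffNat (a - 1) k := by
  rw [ffNat, Finset.prod_range_succ', mul_comm, ffNat]
  simp only [Nat.sub_zero]
  congr 1
  exact Finset.prod_congr rfl (fun i _ => by rw [Nat.sub_sub, Nat.add_comm])

theorem picks_length (xs : List Int) : (picks xs).length = xs.length := by
  induction xs with
  | nil => rfl
  | cons x xs ih => simp [picks, ih]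

theorem picks_snd_length (xs : List Int) : ∀ p ∈ picks xs, p.2.length = xs.length - 1 := by
  induction xs with
  | nil => simp [picks]
  | cons x xs ih =>
    intro p hp
    simp only [picks, List.mem_cons, List.mem_map] at hp
    rcases hp with rfl | ⟨q, hq, rfl⟩
    · simp
    · have h := ih q hq
      simp only [List.length_cons]
      cases xs with
      | nil => simp [picks] at hq
      | cons y ys => simp at h ⊢; omega

theorem foldl_count (b1 b2 b3 : List Int → Bool) (l : List (List Int)) (c : Int) :
    l.foldl (fun count s => if b1 s then count else if b2 s then count else if b3 s then count else count + 1) c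
      = c + l.countP (fun s => !b1 s && !b2 s && !b3 s) := by
  induction l generalizing c with
  | nil => simp
  | cons s l ih =>
    simp only [List.foldl_cons, List.countP_cons, ih]
    cases h1 : b1 s <;> cases h2 : b2 s <;> cases h3 : b3 s <;> simp <;> push_cast <;> ring

theorem countP_le_mul (pp q : Int → Bool) (xs : List Int) :
    xs.countP (fun d => pp d && q d) ≤ xs.countP pp * xs.countP q := by
  rcases Nat.eq_zero_or_pos (xs.countP pp) with h | h
  · calc xs.countP (fun d => pp d && q d) ≤ xs.countP pp :=
          List.countP_mono_left (fun a _ hb => by simp_all)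
      _ ≤ _ := by omega
  · calc xs.countP (fun d => pp d && q d) ≤ xs.countP q :=
          List.countP_mono_left (fun a _ hb => by simp_all)
      _ ≤ _ := Nat.le_mul_of_pos_left _ h

theorem picks_eq_range_map (xs : List Int) :
    picks xs = (List.range xs.length).map (fun i => (xs.getD i 0, xs.eraseIdx i)) := by
  induction xs with
  | nil => simp [picks]
  | cons x xs ih =>
    simp only [picks, List.length_cons, List.range_succ_eq_map, List.map_cons, List.map_map, ih]
    rfl

theorem perms_succ (xs : List Int) (r : Nat) :
    PySem.List.permutations xs (r + 1)
      = (picks xs).flatMap (fun p => (PySem.List.permutations p.2 r).map (p.1 :: ·)) := by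
  rw [PySem.List.permutations.eq_2, picks_eq_range_map, List.flatMap_map]
  apply List.flatMap_congr
  intro i hi
  have hlt : i < xs.length := by simpa using hi
  rw [List.getElem?_eq_getElem hlt]
  simp [List.getD_eq_getElem xs 0 hlt, List.getElem?_eq_getElem hlt]

theorem perms_length (k : Nat) : ∀ (xs : List Int), ∀ s ∈ PySem.List.permutations xs k, s.length = k := by
  induction k with
  | zero => intro xs s hs; simp [PySem.List.permutations] at hs; simp [hs]
  | succ k ih =>
    intro xs s hs
    rw [perms_succ] at hs
    simp only [List.mem_flatMap, List.mem_map] at hs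
    obtain ⟨p, _, t, ht, rfl⟩ := hs
    simp [ih p.2 t ht]

theorem perms_nil_of_lt (k : Nat) : ∀ (xs : List Int), xs.length < k → PySem.List.permutations xs k = [] := by
  induction k with
  | zero => intro xs h; omega
  | succ k ih =>
    intro xs h
    rw [perms_succ]
    rw [List.flatMap_eq_nil_iff]
    intro p hp
    rw [ih p.2 (by
      have h2 := picks_snd_length xs p hp
      have h3 : xs ≠ [] := by rintro rfl; simp [picks] at hp
      have h4 : 0 < xs.length := List.length_pos_iff.mpr h3
      omega)]
    simp


theorem picks_sum_indicator (q : Int → Bool) (xs : List Int) :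
    ((picks xs).map (fun p => if q p.1 then 1 else 0)).sum = xs.countP q := by
  induction xs with
  | nil => simp [picks]
  | cons x xs ih =>
    simp only [picks, List.map_cons, List.map_map, List.sum_cons, List.countP_cons]
    have : ((picks xs).map ((fun p => if q p.1 then 1 else 0) ∘ (fun p => (p.1, x :: p.2)))).sum
        = xs.countP q := by
      rw [← ih]; rfl
    rw [this]
    cases hq : q x <;> simp <;> omega

theorem sum_map_const_mul (l : List (Int × List Int)) (c : Nat) (f : Int × List Int → Nat) (h : ∀ p ∈ l, f p = c) :
    (l.map f).sum = l.length * c := by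
  induction l with
  | nil => simp
  | cons p l ih =>
    simp only [List.map_cons, List.sum_cons, List.length_cons, h p (by simp)]
    rw [ih (fun q hq => h q (by simp [hq]))]
    ring

theorem picks_sum_countP (q : Int → Bool) (xs : List Int) :
    ((picks xs).map (fun p => p.2.countP q)).sum + xs.countP q = xs.length * xs.countP q := by
  induction xs with
  | nil => simp [picks]
  | cons x xs ih =>
    simp only [picks, List.map_cons, List.map_map, List.sum_cons, List.countP_cons, List.length_cons]
    have hsplit : ((picks xs).map ((fun p => p.2.countP q) ∘ (fun p => (p.1, x :: p.2)))).sum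
        = ((picks xs).map (fun p => (if q x then 1 else 0) + p.2.countP q)).sum := by
      apply congrArg
      apply List.map_congr_left
      intro p _
      simp [List.countP_cons]
      omega
    rw [hsplit]
    have hadd : ((picks xs).map (fun p => (if q x then 1 else 0) + p.2.countP q)).sum
        = xs.length * (if q x then 1 else 0) + ((picks xs).map (fun p => p.2.countP q)).sum := by
      rw [List.sum_map_add]
      congr 1
      rw [sum_map_const_mul _ _ _ (fun p _ => rfl), picks_length]
    rw [hadd]
    cases hq : q x <;> simp [hq] <;> nlinarith [ih]

theorem picks_sum_pq (pp q : Int → Bool) (xs : List Int) :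
    ((picks xs).map (fun p => (if pp p.1 then 1 else 0) * p.2.countP q)).sum
      + xs.countP (fun d => pp d && q d) = xs.countP pp * xs.countP q := by
  induction xs with
  | nil => simp [picks]
  | cons x xs ih =>
    simp only [picks, List.map_cons, List.map_map, List.sum_cons, List.countP_cons]
    have hsplit : ((picks xs).map ((fun p => (if pp p.1 then 1 else 0) * p.2.countP q) ∘ (fun p => (p.1, x :: p.2)))).sum
        = ((picks xs).map (fun p => (if pp p.1 then 1 else 0) * (if q x then 1 else 0)
            + (if pp p.1 then 1 else 0) * p.2.countP q)).sum := by
      apply congrArg; apply List.map_congr_left; intro p _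
      simp only [Function.comp, List.countP_cons, Nat.mul_add]
      ring
    rw [hsplit, List.sum_map_add]
    have h1 : ((picks xs).map (fun p => (if pp p.1 then 1 else 0) * (if q x then 1 else 0))).sum
        = xs.countP pp * (if q x then 1 else 0) := by
      rw [List.sum_map_mul_right, picks_sum_indicator]
    rw [h1]
    generalize hS : ((picks xs).map (fun p => (if pp p.1 then 1 else 0) * p.2.countP q)).sum = S at ih ⊢
    generalize hP : xs.countP pp = P at ih ⊢
    generalize hQ : xs.countP q = Q at ih ⊢
    generalize hPQ : xs.countP (fun d => pp d && q d) = PQ at ih ⊢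
    cases hp : pp x <;> cases hq : q x <;> simp [hp, hq] <;> nlinarith [ih]

theorem ffNat_zero (a : Nat) : ffNat a 0 = 1 := by simp [ffNat]

theorem getLastD_cons_ne_nil (a d : Int) (s : List Int) (h : s ≠ []) :
    (a :: s).getLastD d = s.getLastD 0 := by
  cases s with
  | nil => exact absurd rfl h
  | cons b t => rw [List.getLastD_cons, List.getLastD_cons, List.getLastD_cons]

theorem count_last (m : Nat) : ∀ (q : Int → Bool) (ys : List Int),
    (PySem.List.permutations ys (m + 1)).countP (fun s => q (s.getLastD 0))
      = ys.countP q * ffNat (ys.length - 1) m := by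
  induction m with
  | zero =>
    intro q ys
    rw [perms_succ, List.countP_flatMap]
    rw [List.map_congr_left (g := fun p => if q p.1 then 1 else 0) (fun p _ => by
      simp [PySem.List.permutations, List.countP_cons])]
    rw [picks_sum_indicator, ffNat_zero, Nat.mul_one]
  | succ m ih =>
    intro q ys
    rw [perms_succ, List.countP_flatMap]
    rw [List.map_congr_left (g := fun p => p.2.countP q * ffNat (ys.length - 2) m) (fun p hp => by
      have hl := picks_snd_length ys p hp
      simp only [Function.comp, List.countP_map]
      rw [List.countP_congr (fun s hs => by
        have hlen := perms_length (m+1) p.2 s hs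
        have hne : s ≠ [] := by intro h; rw [h] at hlen; simp at hlen
        simp only [Function.comp]
        rw [getLastD_cons_ne_nil p.1 0 s hne])]
      rw [ih q p.2, hl, show ys.length - 1 - 1 = ys.length - 2 from by omega])]
    rw [List.sum_map_mul_right, ffNat_succ_front]
    have hsum := picks_sum_countP q ys
    have h2 : ((picks ys).map (fun p => p.2.countP q)).sum = (ys.length - 1) * ys.countP q := by
      rw [Nat.sub_one_mul]
      generalize ht : ys.length * ys.countP q = t at hsum
      omega
    rw [h2]
    have h3 : ys.length - 1 - 1 = ys.length - 2 := by omega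
    rw [h3]
    ring

theorem count_first_last (pp q : Int → Bool) (xs : List Int) (k : Nat) :
    (PySem.List.permutations xs (k + 2)).countP (fun s => pp (s.headD 0) && q (s.getLastD 0))
      = (xs.countP pp * xs.countP q - xs.countP (fun d => pp d && q d)) * ffNat (xs.length - 2) k := by
  rw [perms_succ, List.countP_flatMap]
  rw [List.map_congr_left (g := fun p => (if pp p.1 then 1 else 0) * p.2.countP q * ffNat (xs.length - 2) k)
    (fun p hp => by
      have hl := picks_snd_length xs p hp
      simp only [Function.comp, List.countP_map]
      rw [List.countP_congr (fun s hs => by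
        have hlen := perms_length (k+1) p.2 s hs
        have hne : s ≠ [] := by intro h; rw [h] at hlen; simp at hlen
        simp only [Function.comp, List.headD_cons]
        rw [getLastD_cons_ne_nil p.1 0 s hne])]
      cases hpp : pp p.1 with
      | false => simp [hpp]
      | true =>
        simp only [hpp, Bool.true_and, if_true, one_mul]
        rw [count_last k q p.2, hl, show xs.length - 1 - 1 = xs.length - 2 from by omega])]
  rw [List.sum_map_mul_right]
  congr 1
  have hpq := picks_sum_pq pp q xs
  generalize ht : xs.countP pp * xs.countP q = t at hpq ⊢
  omega

theorem count_one (pp q : Int → Bool) (xs : List Int) :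
    (PySem.List.permutations xs 1).countP (fun s => pp (s.headD 0) && q (s.getLastD 0))
      = xs.countP (fun d => pp d && q d) := by
  rw [perms_succ, List.countP_flatMap]
  rw [List.map_congr_left (g := fun p => if pp p.1 && q p.1 then 1 else 0) (fun p _ => by
    simp [PySem.List.permutations, List.countP_cons])]
  exact picks_sum_indicator (fun d => pp d && q d) xs


theorem ffNat_succ_back (a k : Nat) : ffNat a (k + 1) = ffNat a k * (a - k) := by
  simp [ffNat, Finset.prod_range_succ]

theorem fallI_succ (a : Int) (k : Nat) : fallI a (k + 1) = fallI a k * (a - (k : Int)) := by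
  rw [fallI, List.range_succ, List.foldl_append]
  rfl

theorem cast_ffNat (a k : Nat) (h : k ≤ a) : ((ffNat a k : Nat) : Int) = fallI (a : Int) k := by
  induction k with
  | zero => simp [ffNat, fallI]
  | succ k ih =>
    have h1 : k ≤ a := by omega
    rw [ffNat_succ_back, fallI_succ, Nat.cast_mul, Nat.cast_sub h1, ih h1]

theorem get0_eq (s : List Int) (h : s ≠ []) : (PySem.List.pyGet? s 0).getD 0 = s.headD 0 := by
  cases s with
  | nil => exact absurd rfl h
  | cons a t => rw [PySem.List.pyGet?_zero_cons]; rfl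

theorem getneg_eq (s : List Int) : (PySem.List.pyGet? s (-1)).getD 0 = s.getLastD 0 := by
  rw [PySem.List.pyGet?_neg_one]
  simp [List.getLastD_eq_getLast?]

theorem countP_and_comm (pp q : Int → Bool) (xs : List Int) :
    xs.countP (fun d => pp d && q d) = xs.countP (fun d => q d && pp d) :=
  List.countP_congr (by intro x _; simp [Bool.and_comm])

theorem odd_pq (xs : List Int) :
    xs.countP (fun d => !(d == 0) && !(PySem.Int.mod d 2 == 0))
      = xs.countP (fun d => !(PySem.Int.mod d 2 == 0)) := by
  apply List.countP_congr
  intro d _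
  by_cases hd : d = 0
  · subst hd; decide
  · simp [hd]

theorem main_formula (pp q : Int → Bool) (digits : List Int) (positions : Int) (hpos : 1 ≤ positions) :
    (((PySem.List.permutations digits positions.toNat).countP
        (fun s => pp (s.headD 0) && q (s.getLastD 0)) : Nat) : Int)
      = if (digits.length : Int) < positions then 0
        else if positions == 1 then ((digits.countP (fun d => pp d && q d) : Nat) : Int)
        else (((digits.countP pp : Nat) : Int) * ((digits.countP q : Nat) : Int)
                - ((digits.countP (fun d => pp d && q d) : Nat) : Int))
              * fallI ((digits.length : Int) - 2) (positions - 2).toNat := by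
  by_cases hbig : (digits.length : Int) < positions
  · rw [if_pos hbig]
    have hlt : digits.length < positions.toNat := by omega
    rw [perms_nil_of_lt _ _ hlt]
    simp
  · rw [if_neg hbig]
    have hkn : positions.toNat ≤ digits.length := by omega
    by_cases h1 : positions = 1
    · subst h1
      rw [if_pos (by decide)]
      rw [show (1 : Int).toNat = 0 + 1 from rfl, count_one pp q digits]
    · rw [if_neg (by simpa using h1)]
      have h2 : 2 ≤ positions.toNat := by omega
      have hsplit : positions.toNat = (positions.toNat - 2) + 2 := by omega
      rw [hsplit, count_first_last pp q digits (positions.toNat - 2)]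
      have hle := countP_le_mul pp q digits
      rw [Nat.cast_mul, Nat.cast_sub hle, Nat.cast_mul,
        cast_ffNat _ _ (by omega : positions.toNat - 2 ≤ digits.length - 2),
        Nat.cast_sub (by omega : 2 ≤ digits.length),
        show (positions - 2).toNat = positions.toNat - 2 from by omega]
      push_cast
      ring

theorem countP_congr' {α : Type} (p q : α → Bool) (l : List α) (h : ∀ x ∈ l, p x = q x) :
    l.countP p = l.countP q :=
  List.countP_congr (fun x hx => by rw [h x hx])

theorem alt_odd (digits : List Int) (positions : Int) (hpos : 1 ≤ positions) :
    bruteforce_digit_parity_py_alt digits positions "odd_number"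
      = (if (digits.length : Int) < positions then 0
         else if positions == 1 then ((digits.countP (fun d => !(d == 0) && !(PySem.Int.mod d 2 == 0)) : Nat) : Int)
         else (((digits.countP (fun d => !(d == 0)) : Nat) : Int) * ((digits.countP (fun d => !(PySem.Int.mod d 2 == 0)) : Nat) : Int)
                 - ((digits.countP (fun d => !(d == 0) && !(PySem.Int.mod d 2 == 0)) : Nat) : Int))
               * fallI ((digits.length : Int) - 2) (positions - 2).toNat) := by
  rw [odd_pq]
  unfold bruteforce_digit_parity_py_alt
  simp only [show (("odd_number" : String) == "odd_number") = true from by decide, if_true]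
  simp only [decide_eq_false (by omega : ¬ positions < 1), Bool.false_or]
  simp

theorem alt_even (digits : List Int) (positions : Int) (hpos : 1 ≤ positions) :
    bruteforce_digit_parity_py_alt digits positions "even_number"
      = (if (digits.length : Int) < positions then 0
         else if positions == 1 then ((digits.countP (fun d => !(d == 0) && (PySem.Int.mod d 2 == 0)) : Nat) : Int)
         else (((digits.countP (fun d => !(d == 0)) : Nat) : Int) * ((digits.countP (fun d => PySem.Int.mod d 2 == 0) : Nat) : Int)
                 - ((digits.countP (fun d => !(d == 0) && (PySem.Int.mod d 2 == 0)) : Nat) : Int))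
               * fallI ((digits.length : Int) - 2) (positions - 2).toNat) := by
  rw [countP_and_comm (fun d => !(d == 0)) (fun d => PySem.Int.mod d 2 == 0)]
  unfold bruteforce_digit_parity_py_alt
  simp only [show (("even_number" : String) == "odd_number") = false from by decide,
    show (("even_number" : String) == "even_number") = true from by decide,
    Bool.false_eq_true, if_false, if_true]
  simp only [decide_eq_false (by omega : ¬ positions < 1), Bool.false_or]
  simp

theorem alt_default (digits : List Int) (positions : Int) (variant : String) (hpos : 1 ≤ positions)
    (h1 : variant ≠ "odd_number") (h2 : variant ≠ "even_number") :
    bruteforce_digit_parity_py_alt digits positions variant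
      = (if (digits.length : Int) < positions then 0
         else if positions == 1 then ((digits.countP (fun d => !(d == 0) && true) : Nat) : Int)
         else (((digits.countP (fun d => !(d == 0)) : Nat) : Int) * ((digits.countP (fun _ => true) : Nat) : Int)
                 - ((digits.countP (fun d => !(d == 0) && true) : Nat) : Int))
               * fallI ((digits.length : Int) - 2) (positions - 2).toNat) := by
  have e1 : (variant == "odd_number") = false := by simp [h1]
  have e2 : (variant == "even_number") = false := by simp [h2]
  unfold bruteforce_digit_parity_py_alt
  simp only [e1, e2, Bool.false_eq_true, if_false]
  simp only [decide_eq_false (by omega : ¬ positions < 1), Bool.false_or]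
  simp [List.countP_true]

theorem final (digits : List Int) (positions : Int) (variant : String) (hpos : 1 ≤ positions) :
    bruteforce_digit_parity_py digits positions variant = bruteforce_digit_parity_py_alt digits positions variant := by
  have hk1 : 1 ≤ positions.toNat := by omega
  unfold bruteforce_digit_parity_py
  rw [foldl_count (fun s => ((PySem.List.pyGet? s 0).getD 0 == 0))
      (fun s => (variant == "odd_number" && (PySem.Int.mod ((PySem.List.pyGet? s (-1)).getD 0) 2 == 0)))
      (fun s => (variant == "even_number" && !(PySem.Int.mod ((PySem.List.pyGet? s (-1)).getD 0) 2 == 0)))]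
  rw [zero_add]
  rw [countP_congr' _ (fun s => !(s.headD 0 == 0)
      && !(variant == "odd_number" && (PySem.Int.mod (s.getLastD 0) 2 == 0))
      && !(variant == "even_number" && !(PySem.Int.mod (s.getLastD 0) 2 == 0))) _
    (fun s hs => by
      have hlen := perms_length positions.toNat digits s hs
      have hne : s ≠ [] := by intro h; rw [h] at hlen; simp at hlen; omega
      rw [get0_eq s hne, getneg_eq s])]
  by_cases hv1 : variant = "odd_number"
  · subst hv1
    rw [alt_odd digits positions hpos]
    rw [← main_formula (fun d => !(d == 0)) (fun d => !(PySem.Int.mod d 2 == 0)) digits positions hpos]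
    congr 1
    apply countP_congr'
    intro s _
    simp [-Bool.not_eq_true]
  · by_cases hv2 : variant = "even_number"
    · subst hv2
      rw [alt_even digits positions hpos]
      rw [← main_formula (fun d => !(d == 0)) (fun d => PySem.Int.mod d 2 == 0) digits positions hpos]
      congr 1
      apply countP_congr'
      intro s _
      simp [-Bool.not_eq_true]
    · rw [alt_default digits positions variant hpos hv1 hv2]
      rw [← main_formula (fun d => !(d == 0)) (fun _ => true) digits positions hpos]
      congr 1
      apply countP_congr'
      intro s _
      have e1 : (variant == "odd_number") = false := by simp [hv1]
      have e2 : (variant == "even_number") = false := by simp [hv2]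
      simp [e1, e2, -Bool.not_eq_true]


-- ===== VERDICT (by name: the statement is the Claim_ definition above) =====
theorem bruteforce_digit_parity_py_spec : Claim_equal_bruteforce_digit_parity_py := by
  intro digits positions variant _ hpre
  unfold Pre_bruteforce_digit_parity_py at hpre
  unfold Spec_bruteforce_digit_parity_py
  exact final digits positions variant hpre
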